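-- pv_equiv track=rewrite | github.com/thinlines/ledger-flow | app/backend/services/account_register_service.py | _unique_grouped_component_mask
-- ===== SOURCE A (Python) =====
-- from collections import defaultdict
-- from functools import lru_cache
--
-- def _mask_packings_union(packings: tuple[tuple[int, ...], ...], additions: tuple[tuple[int, ...], ...]) -> tuple[tuple[int, ...], ...]:
--     merged: list[tuple[int, ...]] = list(packings)
--     for packing in additions:
--         if packing in merged:
--             continue
--         merged.append(packing)
--         if len(merged) == 2:
--             break
--     return tuple(merged)
--
-- def _unique_grouped_component_mask(component_mask: int, masks: list[int]) -> int:
--     row_masks: dict[int, list[int]] = defaultdict(list)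
--     for mask in masks:
--         row_bits = mask
--         while row_bits:
--             row_bit = row_bits & -row_bits
--             row_masks[row_bit.bit_length() - 1].append(mask)
--             row_bits ^= row_bit
--
--     @lru_cache(maxsize=None)
--     def _solve(available_mask: int) -> tuple[int, tuple[tuple[int, ...], ...]]:
--         if available_mask == 0:
--             return (0, ((),))
--
--         first_bit = available_mask & -available_mask
--         first_index = first_bit.bit_length() - 1
--
--         best_count, best_packings = _solve(available_mask ^ first_bit)
--         for mask in row_masks.get(first_index, []):
--             if mask & available_mask != mask:
--                 continue
--             covered_count, packings = _solve(available_mask ^ mask)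
--             covered_count += mask.bit_count()
--             normalized = tuple(tuple(sorted((mask, *packing))) for packing in packings)
--             if covered_count > best_count:
--                 best_count = covered_count
--                 best_packings = normalized[:2]
--             elif covered_count == best_count:
--                 best_packings = _mask_packings_union(best_packings, normalized)
--
--         return (best_count, best_packings)
--
--     covered_count, packings = _solve(component_mask)
--     if covered_count == 0 or len(packings) != 1:
--         return 0
--
--     covered_mask = 0
--     for mask in packings[0]:
--         covered_mask |= mask
--     return covered_mask
-- ===== SOURCE B (Python) =====
-- # B: same row_masks index, but the memoized recursion is replaced by an explicit
-- # bounded-depth reachability pass plus a bottom-up table over the reachable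
-- # submasks in increasing order (iterative DP instead of recursion).
-- def _mask_packings_merge(packings, additions):
--     merged = list(packings)
--     for packing in additions:
--         if packing in merged:
--             continue
--         merged.append(packing)
--         if len(merged) == 2:
--             break
--     return tuple(merged)
--
-- def _unique_grouped_component_mask(component_mask: int, masks: list[int]) -> int:
--     row_masks = {}
--     for mask in masks:
--         row_bits = mask
--         while row_bits:
--             row_bit = row_bits & -row_bits
--             row_masks.setdefault(row_bit.bit_length() - 1, []).append(mask)
--             row_bits ^= row_bit
--
--     def successors(s):
--         if s == 0:
--             return []
--         first_bit = s & -s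
--         out = [s ^ first_bit]
--         for mask in row_masks.get(first_bit.bit_length() - 1, []):
--             if mask & s == mask:
--                 out.append(s ^ mask)
--         return out
--
--     # every successor loses at least one bit, so bit_count(component_mask)
--     # rounds of frontier expansion reach every state the recursion would visit
--     reach = {component_mask}
--     frontier = [component_mask]
--     for _ in range(component_mask.bit_count()):
--         next_frontier = []
--         for s in frontier:
--             for t in successors(s):
--                 if t not in reach:
--                     reach.add(t)
--                     next_frontier.append(t)
--         frontier = next_frontier
--
--     dp = {}
--     for s in sorted(reach):
--         if s == 0:
--             dp[s] = (0, ((),))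
--             continue
--         first_bit = s & -s
--         best_count, best_packings = dp[s ^ first_bit]
--         for mask in row_masks.get(first_bit.bit_length() - 1, []):
--             if mask & s != mask:
--                 continue
--             covered_count, packings = dp[s ^ mask]
--             covered_count += mask.bit_count()
--             normalized = tuple(tuple(sorted((mask, *packing))) for packing in packings)
--             if covered_count > best_count:
--                 best_count = covered_count
--                 best_packings = normalized[:2]
--             elif covered_count == best_count:
--                 best_packings = _mask_packings_merge(best_packings, normalized)
--         dp[s] = (best_count, best_packings)
--
--     covered_count, packings = dp[component_mask]
--     if covered_count == 0 or len(packings) != 1: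
--         return 0
--     covered_mask = 0
--     for mask in packings[0]:
--         covered_mask |= mask
--     return covered_mask
-- ===== Notes on version B (the rewrite author's own statement) =====
-- stated objective: alternative
-- what changed: The lru_cache-memoized top-down recursion is replaced by an explicit bounded-depth reachability pass (bit_count(component_mask) frontier expansions) followed by a bottom-up table filled over the reachable submasks in increasing integer order.
import Mathlib
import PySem

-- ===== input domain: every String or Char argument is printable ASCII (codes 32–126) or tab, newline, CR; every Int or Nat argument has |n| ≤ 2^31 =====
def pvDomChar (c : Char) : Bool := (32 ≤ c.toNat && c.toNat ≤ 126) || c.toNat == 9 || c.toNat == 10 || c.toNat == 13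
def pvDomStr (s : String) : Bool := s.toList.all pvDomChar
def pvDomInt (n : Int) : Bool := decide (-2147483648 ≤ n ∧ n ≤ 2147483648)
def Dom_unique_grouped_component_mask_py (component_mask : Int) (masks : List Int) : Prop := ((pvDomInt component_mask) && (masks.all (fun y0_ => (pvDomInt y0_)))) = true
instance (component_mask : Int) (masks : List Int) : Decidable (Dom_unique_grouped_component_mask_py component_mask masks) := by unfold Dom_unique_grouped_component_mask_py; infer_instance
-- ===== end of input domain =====

-- B replaces A's lru_cache-memoized top-down recursion by an explicit bounded-depth
-- reachability pass plus a bottom-up table over the reachable submasks in increasing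
-- order (alternative decomposition, same asymptotic cost).

-- ===== PORT A =====
-- row_masks building: 'for mask in masks: while row_bits: …'.  The while loop removes one
-- set bit per iteration, so for the nonnegative masks admitted by Pre_ it runs exactly
-- bit_count(mask) times; that is the fuel (on negative masks the Python loop never ends).
def pvRowLoop (mask : Int) : Nat → Int → PySem.Dict Int (List Int) → PySem.Dict Int (List Int)
  | 0, _, d => d
  | fuel+1, rowBits, d =>
    if rowBits = 0 then d
    else
      let rowBit := PySem.Int.band rowBits (-rowBits)
      pvRowLoop mask fuel (PySem.Int.bxor rowBits rowBit)
        (d.modify ((PySem.Int.bitLength rowBit : Int) - 1) [] (fun l => l ++ [mask]))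

-- shared by both ports: A's and B's Python build the identical row_masks index
def pvRowMasks (masks : List Int) : PySem.Dict Int (List Int) :=
  masks.foldl (fun d mask => pvRowLoop mask (PySem.Int.bitCount mask) mask d) PySem.Dict.empty

-- _mask_packings_union
def pvUnionA : List (List Int) → List (List Int) → List (List Int)
  | merged, [] => merged
  | merged, p :: rest =>
    if p ∈ merged then pvUnionA merged rest
    else if (merged ++ [p]).length = 2 then merged ++ [p]
    else pvUnionA (merged ++ [p]) rest

-- _solve: the recursion always descends to a value with strictly smaller toNat (for the
-- nonnegative inputs admitted by Pre_), so fuel a.toNat + 1 reproduces it exactly; on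
-- negative component_mask the Python recursion never terminates (RecursionError).
def pvSolveA (row : PySem.Dict Int (List Int)) : Nat → Int → Int × List (List Int)
  | 0, _ => (0, [[]])
  | fuel+1, a =>
    if a = 0 then (0, [[]])
    else
      let firstBit := PySem.Int.band a (-a)
      let firstIndex : Int := (PySem.Int.bitLength firstBit : Int) - 1
      (row.getD firstIndex []).foldl
        (fun best mask =>
          if PySem.Int.band mask a ≠ mask then best
          else
            let r := pvSolveA row fuel (PySem.Int.bxor a mask)
            let coveredCount := r.1 + (PySem.Int.bitCount mask : Int)
            let normalized := r.2.map (fun p => PySem.List.sorted (mask :: p) (fun x => x) false)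
            if best.1 < coveredCount then (coveredCount, normalized.take 2)
            else if coveredCount = best.1 then (best.1, pvUnionA best.2 normalized)
            else best)
        (pvSolveA row fuel (PySem.Int.bxor a firstBit))

def unique_grouped_component_mask_py (component_mask : Int) (masks : List Int) : Int :=
  let row := pvRowMasks masks
  let r := pvSolveA row (component_mask.toNat + 1) component_mask
  if r.1 = 0 ∨ r.2.length ≠ 1 then 0
  else (PySem.List.pyGetD r.2 0 []).foldl (fun acc m => PySem.Int.bor acc m) 0

-- ===== PORT B =====
-- _mask_packings_merge
def pvMergeB : List (List Int) → List (List Int) → List (List Int)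
  | merged, [] => merged
  | merged, p :: rest =>
    if p ∈ merged then pvMergeB merged rest
    else if (merged ++ [p]).length = 2 then merged ++ [p]
    else pvMergeB (merged ++ [p]) rest

-- successors(s)
def pvSuccessors (row : PySem.Dict Int (List Int)) (s : Int) : List Int :=
  if s = 0 then []
  else
    let firstBit := PySem.Int.band s (-s)
    (PySem.Int.bxor s firstBit) ::
      ((row.getD ((PySem.Int.bitLength firstBit : Int) - 1) []).filter
        (fun mask => decide (PySem.Int.band mask s = mask))).map (fun mask => PySem.Int.bxor s mask)

-- one frontier-expansion round
def pvRound (row : PySem.Dict Int (List Int)) (st : PySem.Set Int × List Int) :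
    PySem.Set Int × List Int :=
  st.2.foldl (fun acc s =>
    (pvSuccessors row s).foldl (fun acc t =>
      if PySem.Set.contains acc.1 t then acc
      else (PySem.Set.add acc.1 t, acc.2 ++ [t])) acc)
    (st.1, [])

-- bit_count(component_mask) rounds of frontier expansion
def pvReach (row : PySem.Dict Int (List Int)) (component_mask : Int) : PySem.Set Int :=
  ((List.range (PySem.Int.bitCount component_mask)).foldl (fun st _ => pvRound row st)
    (PySem.Set.ofList [component_mask], [component_mask])).1

-- one bottom-up table entry.  Python indexes dp[s ^ …]; those keys are always present
-- when the states are processed in increasing order, so the getD default is never read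
-- on the inputs admitted by Pre_ (a totality guard only).
def pvStep (row : PySem.Dict Int (List Int)) (dp : PySem.Dict Int (Int × List (List Int)))
    (s : Int) : PySem.Dict Int (Int × List (List Int)) :=
  if s = 0 then dp.insert 0 (0, [[]])
  else
    let firstBit := PySem.Int.band s (-s)
    let firstIndex : Int := (PySem.Int.bitLength firstBit : Int) - 1
    dp.insert s
      ((row.getD firstIndex []).foldl
        (fun best mask =>
          if PySem.Int.band mask s ≠ mask then best
          else
            let r := dp.getD (PySem.Int.bxor s mask) (0, [[]])
            let coveredCount := r.1 + (PySem.Int.bitCount mask : Int)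
            let normalized := r.2.map (fun p => PySem.List.sorted (mask :: p) (fun x => x) false)
            if best.1 < coveredCount then (coveredCount, normalized.take 2)
            else if coveredCount = best.1 then (best.1, pvMergeB best.2 normalized)
            else best)
        (dp.getD (PySem.Int.bxor s firstBit) (0, [[]])))

def unique_grouped_component_mask_py_alt (component_mask : Int) (masks : List Int) : Int :=
  let row := pvRowMasks masks
  let dp := (PySem.List.sorted (pvReach row component_mask) (fun x => x) false).foldl
    (pvStep row) PySem.Dict.empty
  let r := dp.getD component_mask (0, [[]])
  if r.1 = 0 ∨ r.2.length ≠ 1 then 0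
  else (PySem.List.pyGetD r.2 0 []).foldl (fun acc m => PySem.Int.bor acc m) 0

-- ===== PRECONDITION & SPEC =====
-- Pre_ excludes negative integers: on a negative entry of masks A's row_masks while loop
-- never terminates, and on a negative component_mask A's recursion never reaches 0 and
-- dies with RecursionError — A returns no value outside Pre_.
def Pre_unique_grouped_component_mask_py (component_mask : Int) (masks : List Int) : Prop :=
  0 ≤ component_mask ∧ ∀ m ∈ masks, 0 ≤ m
instance (component_mask : Int) (masks : List Int) :
    Decidable (Pre_unique_grouped_component_mask_py component_mask masks) := by
  unfold Pre_unique_grouped_component_mask_py; infer_instance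

def pvWitness_unique_grouped_component_mask_py : Int × List Int := (5, [1, 4, 6])

def Spec_unique_grouped_component_mask_py (component_mask : Int) (masks : List Int) (out : Int) : Prop := out = unique_grouped_component_mask_py_alt component_mask masks
instance (component_mask : Int) (masks : List Int) (out : Int) : Decidable (Spec_unique_grouped_component_mask_py component_mask masks out) := by unfold Spec_unique_grouped_component_mask_py; infer_instance

-- ===== CLAIM (what is proved, stated in full; the proofs are below) =====
def Claim_equal_unique_grouped_component_mask_py : Prop := ∀ (component_mask : Int) (masks : List Int), Dom_unique_grouped_component_mask_py component_mask masks → Pre_unique_grouped_component_mask_py component_mask masks → Spec_unique_grouped_component_mask_py component_mask masks (unique_grouped_component_mask_py component_mask masks)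

-- ===== LEMMAS AND PROOFS =====

-- parity facts about Nat bitwise operations in arithmetic form
theorem pvLandMod2 (a b : Nat) : (a &&& b) % 2 = a % 2 * (b % 2) := by
  have h := Nat.testBit_and a b 0
  simp only [Nat.testBit_zero] at h
  rcases Nat.mod_two_eq_zero_or_one a with h1 | h1 <;>
    rcases Nat.mod_two_eq_zero_or_one b with h2 | h2 <;>
      rcases Nat.mod_two_eq_zero_or_one (a &&& b) with h3 | h3 <;>
        simp [h1, h2, h3] at h ⊢

theorem pvXorMod2 (a b : Nat) : (a ^^^ b) % 2 = (a % 2 + b % 2) % 2 := by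
  have h := Nat.testBit_xor a b 0
  simp only [Nat.testBit_zero] at h
  rcases Nat.mod_two_eq_zero_or_one a with h1 | h1 <;>
    rcases Nat.mod_two_eq_zero_or_one b with h2 | h2 <;>
      rcases Nat.mod_two_eq_zero_or_one (a ^^^ b) with h3 | h3 <;>
        simp [h1, h2, h3] at h ⊢

-- a bit-subset can be subtracted bit by bit: y ⊆ m (as bit sets) gives m - y = m ^^^ y
theorem pvSubXor : ∀ m y : Nat, y &&& m = y → m - y = m ^^^ y := by
  intro m
  induction m using Nat.strong_induction_on with
  | _ m ih =>
    intro y hy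
    rcases Nat.eq_zero_or_pos m with hm | hm
    · subst hm
      have : y = 0 := by simpa using hy.symm
      simp [this]
    · have hdiv : y / 2 &&& m / 2 = y / 2 := by
        have := congrArg (· / 2) hy
        simpa [Nat.and_div_two] using this
      have hmod : y % 2 * (m % 2) = y % 2 := by
        have := congrArg (· % 2) hy
        simpa [pvLandMod2] using this
      have ihalf : m / 2 - y / 2 = m / 2 ^^^ y / 2 :=
        ih (m / 2) (Nat.div_lt_self hm (by omega)) (y / 2) hdiv
      have hyle : y / 2 ≤ m / 2 := by
        conv_lhs => rw [← hdiv]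
        exact Nat.and_le_right
      have hxd : (m ^^^ y) / 2 = m / 2 ^^^ y / 2 := Nat.xor_div_two
      have hxm : (m ^^^ y) % 2 = (m % 2 + y % 2) % 2 := pvXorMod2 m y
      have hb : y % 2 ≤ m % 2 := by
        rcases Nat.mod_two_eq_zero_or_one m with h | h
        · rw [h, Nat.mul_zero] at hmod; omega
        · omega
      omega

-- popcount, and its agreement with PySem.Int.bitCount on casts of naturals
def pvPop : Nat → Nat
  | 0 => 0
  | m + 1 => (m + 1) % 2 + pvPop ((m + 1) / 2)
decreasing_by exact Nat.div_lt_self (Nat.succ_pos m) (by omega)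

theorem pvPop_eq : ∀ m : Nat, PySem.Int.bitCount (m : Int) = pvPop m := by
  intro m
  induction m using Nat.strong_induction_on with
  | _ m ih =>
    rcases Nat.eq_zero_or_pos m with hm | hm
    · subst hm; simp [pvPop, PySem.Int.bitCount_zero]
    · rw [PySem.Int.bitCount_natCast hm, ih (m / 2) (Nat.div_lt_self hm (by omega))]
      rcases m with _ | m
      · omega
      · simp [pvPop]

theorem pvPop_unfold (n : Nat) (h : 0 < n) : pvPop n = n % 2 + pvPop (n / 2) := by
  rcases n with _ | n
  · omega
  · simp [pvPop]

theorem pvPop_pos : ∀ m : Nat, 0 < m → 0 < pvPop m := by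
  intro m
  induction m using Nat.strong_induction_on with
  | _ m ih =>
    intro hm
    rw [pvPop_unfold m hm]
    rcases Nat.mod_two_eq_zero_or_one m with h | h
    · have h2 : 0 < m / 2 := by omega
      have := ih (m / 2) (Nat.div_lt_self hm (by omega)) h2
      omega
    · omega

-- popcount splits over a bit-subset: pop m = pop (m ^^^ y) + pop y when y ⊆ m
theorem pvPopAdd : ∀ m y : Nat, y &&& m = y → pvPop m = pvPop (m ^^^ y) + pvPop y := by
  intro m
  induction m using Nat.strong_induction_on with
  | _ m ih =>
    intro y hy
    rcases Nat.eq_zero_or_pos m with hm | hm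
    · subst hm
      have : y = 0 := by simpa using hy.symm
      simp [this, pvPop]
    · rcases Nat.eq_zero_or_pos y with hy0 | hy0
      · subst hy0; simp [pvPop]
      · by_cases hxy : m ^^^ y = 0
        · have : m = y := by
            have h' := congrArg (fun t => t ^^^ y) hxy
            simpa [Nat.xor_assoc, Nat.xor_self] using h'
          rw [hxy, this]
          simp [pvPop]
        · have hdiv : y / 2 &&& m / 2 = y / 2 := by
            have := congrArg (· / 2) hy
            simpa [Nat.and_div_two] using this
          have hmod : y % 2 * (m % 2) = y % 2 := by
            have := congrArg (· % 2) hy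
            simpa [pvLandMod2] using this
          have ihalf := ih (m / 2) (Nat.div_lt_self hm (by omega)) (y / 2) hdiv
          have hxd : (m ^^^ y) / 2 = m / 2 ^^^ y / 2 := Nat.xor_div_two
          have hxm : (m ^^^ y) % 2 = (m % 2 + y % 2) % 2 := pvXorMod2 m y
          have hb : y % 2 ≤ m % 2 := by
            rcases Nat.mod_two_eq_zero_or_one m with h | h
            · rw [h, Nat.mul_zero] at hmod; omega
            · omega
          have pm := pvPop_unfold m hm
          have py := pvPop_unfold y hy0
          have pxy := pvPop_unfold (m ^^^ y) (Nat.pos_of_ne_zero hxy)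
          rw [hxd] at pxy
          omega

-- lowest-set-bit arithmetic: m & -m on a positive cast, in Nat terms
theorem pvBandNegNat (m : Nat) (h : 0 < m) :
    PySem.Int.band (m : Int) (-(m : Int)) = ((m - (m &&& (m - 1)) : Nat) : Int) := by
  have h1 : ¬ (0 ≤ -(m : Int)) := by
    have : (0 : Int) < m := by exact_mod_cast h
    omega
  have h0 : (0 : Int) ≤ (m : Int) := Int.natCast_nonneg m
  simp only [PySem.Int.band, if_pos h0, if_neg h1]
  have e : (-(-(m : Int)) - 1) = ((m - 1 : Nat) : Int) := by push_cast [h]; ring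
  rw [e]
  simp

theorem pvAsub (m : Nat) : (m &&& (m - 1)) &&& m = m &&& (m - 1) := by
  rw [Nat.and_comm (m &&& (m - 1)) m, ← Nat.and_assoc, Nat.and_self]

-- the skip successor a ^ (a & -a) clears exactly the lowest set bit
theorem pvSkipEq (m : Nat) (h : 0 < m) :
    PySem.Int.bxor (m : Int) (PySem.Int.band (m : Int) (-(m : Int)))
      = ((m &&& (m - 1) : Nat) : Int) := by
  rw [pvBandNegNat m h, pvSubXor m _ (pvAsub m), PySem.Int.bxor_natCast]
  exact congrArg _ (Nat.xor_xor_cancel_left m (m &&& (m - 1)))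

-- facts about a successor a ^ x for a bit-subset x ≠ 0 of a
theorem pvSuccFact (a x : Int) (ha : 0 ≤ a) (hx : 0 ≤ x) (hxne : x ≠ 0)
    (hsub : PySem.Int.band x a = x) :
    0 ≤ PySem.Int.bxor a x ∧ (PySem.Int.bxor a x).toNat < a.toNat ∧
      PySem.Int.bitCount (PySem.Int.bxor a x) < PySem.Int.bitCount a := by
  obtain ⟨m, rfl⟩ := Int.eq_ofNat_of_zero_le ha
  obtain ⟨y, rfl⟩ := Int.eq_ofNat_of_zero_le hx
  rw [PySem.Int.band_natCast] at hsub
  have hy : y &&& m = y := by exact_mod_cast hsub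
  have hy0 : y ≠ 0 := fun hh => hxne (by simp [hh])
  have hypos : 0 < y := Nat.pos_of_ne_zero hy0
  rw [PySem.Int.bxor_natCast]
  have hsx : m ^^^ y = m - y := (pvSubXor m y hy).symm
  have hyle : y ≤ m := by
    conv_lhs => rw [← hy]
    exact Nat.and_le_right
  refine ⟨Int.natCast_nonneg _, ?_, ?_⟩
  · simp only [Int.toNat_natCast]
    omega
  · rw [pvPop_eq, pvPop_eq]
    have hadd := pvPopAdd m y hy
    have hpos := pvPop_pos y hypos
    omega

theorem pvSkipFact (a : Int) (ha : 0 ≤ a) (hne : a ≠ 0) :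
    0 ≤ PySem.Int.bxor a (PySem.Int.band a (-a)) ∧
      (PySem.Int.bxor a (PySem.Int.band a (-a))).toNat < a.toNat ∧
      PySem.Int.bitCount (PySem.Int.bxor a (PySem.Int.band a (-a))) < PySem.Int.bitCount a := by
  obtain ⟨m, rfl⟩ := Int.eq_ofNat_of_zero_le ha
  have hm : 0 < m := Nat.pos_of_ne_zero (fun hh => hne (by simp [hh]))
  rw [pvSkipEq m hm]
  have hA : (m &&& (m - 1)) &&& m = m &&& (m - 1) := pvAsub m
  have hAle : m &&& (m - 1) ≤ m - 1 := Nat.and_le_right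
  have hsx : m ^^^ (m &&& (m - 1)) = m - (m &&& (m - 1)) := (pvSubXor m _ hA).symm
  refine ⟨Int.natCast_nonneg _, ?_, ?_⟩
  · simp only [Int.toNat_natCast]
    omega
  · rw [pvPop_eq, pvPop_eq]
    have hadd := pvPopAdd m _ hA
    have hpos : 0 < pvPop (m ^^^ (m &&& (m - 1))) := by
      rw [hsx]; exact pvPop_pos _ (by omega)
    omega

-- the row_masks dictionary only stores nonzero masks from the input list
theorem pvRowLoopInv (mask : Int) (hm : 0 ≤ mask) (hne : mask ≠ 0) :
    ∀ (fuel : Nat) (rb : Int) (d : PySem.Dict Int (List Int)),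
      (∀ i x, x ∈ d.getD i [] → 0 ≤ x ∧ x ≠ 0) →
      ∀ i x, x ∈ (pvRowLoop mask fuel rb d).getD i [] → 0 ≤ x ∧ x ≠ 0 := by
  intro fuel
  induction fuel with
  | zero => intro rb d hd i x hx; exact hd i x (by simpa [pvRowLoop] using hx)
  | succ fuel ih =>
    intro rb d hd i x hx
    by_cases h0 : rb = 0
    · simp only [pvRowLoop, if_pos h0] at hx
      exact hd _ _ hx
    · simp only [pvRowLoop, if_neg h0] at hx
      refine ih _ _ ?_ i x hx
      intro j z hz
      rw [PySem.Dict.getD_modify] at hz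
      split_ifs at hz with hj
      · rcases List.mem_append.mp hz with h | h
        · exact hd _ _ h
        · simp only [List.mem_singleton] at h
          exact h ▸ ⟨hm, hne⟩
      · exact hd _ _ hz

theorem pvRowMasksInv (masks : List Int) (h : ∀ m ∈ masks, 0 ≤ m) :
    ∀ i x, x ∈ (pvRowMasks masks).getD i [] → 0 ≤ x ∧ x ≠ 0 := by
  have aux : ∀ (l : List Int) (d : PySem.Dict Int (List Int)), (∀ m ∈ l, 0 ≤ m) →
      (∀ i x, x ∈ d.getD i [] → 0 ≤ x ∧ x ≠ 0) →
      ∀ i x, x ∈ (l.foldl (fun d mask => pvRowLoop mask (PySem.Int.bitCount mask) mask d) d).getD i [] →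
        0 ≤ x ∧ x ≠ 0 := by
    intro l
    induction l with
    | nil => intro d _ hd; simpa using hd
    | cons mask rest ih =>
      intro d hl hd
      refine ih _ (fun m hm => hl m (List.mem_cons_of_mem _ hm)) ?_
      by_cases hm0 : mask = 0
      · subst hm0
        simpa [PySem.Int.bitCount_zero, pvRowLoop] using hd
      · exact pvRowLoopInv mask (hl mask (by simp)) hm0 _ _ _ hd
  refine aux masks PySem.Dict.empty h ?_
  intro i x hx
  simp [PySem.Dict.getD_empty] at hx

-- the fuelled port of _solve computes the same value for every sufficient fuel
theorem pvSolveA_fuel (row : PySem.Dict Int (List Int))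
    (hrow : ∀ i x, x ∈ row.getD i [] → 0 ≤ x ∧ x ≠ 0) :
    ∀ (fuel : Nat) (a : Int), 0 ≤ a → a.toNat < fuel →
      pvSolveA row fuel a = pvSolveA row (a.toNat + 1) a := by
  intro fuel
  induction fuel using Nat.strong_induction_on with
  | _ fuel ih =>
    intro a ha hlt
    rcases fuel with _ | f
    · omega
    by_cases h0 : a = 0
    · simp [pvSolveA, h0]
    · have hmpos : 0 < a.toNat := by omega
      simp only [pvSolveA, if_neg h0]
      obtain ⟨hs1, hs2, _⟩ := pvSkipFact a ha h0
      rw [ih f (by omega) _ hs1 (by omega),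
          ← ih a.toNat (by omega) _ hs1 (by omega)]
      refine PySem.List.foldl_congr_mem' _ _ _ _ ?_
      intro mask hmem best
      by_cases hg : PySem.Int.band mask a = mask
      · obtain ⟨hxnn, hxne⟩ := hrow _ _ hmem
        obtain ⟨ht1, ht2, _⟩ := pvSuccFact a mask ha hxnn hxne hg
        simp only [if_neg (not_not_intro hg)]
        rw [ih f (by omega) _ ht1 (by omega),
            ← ih a.toNat (by omega) _ ht1 (by omega)]
      · simp [hg]

-- canonical form of A's _solve (the value the ports agree on)
def pvF (row : PySem.Dict Int (List Int)) (a : Int) : Int × List (List Int) :=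
  pvSolveA row (a.toNat + 1) a

theorem pvF_zero (row : PySem.Dict Int (List Int)) : pvF row 0 = (0, [[]]) := rfl

theorem pvF_unfold (row : PySem.Dict Int (List Int))
    (hrow : ∀ i x, x ∈ row.getD i [] → 0 ≤ x ∧ x ≠ 0)
    (a : Int) (ha : 0 ≤ a) (h0 : a ≠ 0) :
    pvF row a =
      (row.getD ((PySem.Int.bitLength (PySem.Int.band a (-a)) : Int) - 1) []).foldl
        (fun best mask =>
          if PySem.Int.band mask a ≠ mask then best
          else
            let r := pvF row (PySem.Int.bxor a mask)
            let coveredCount := r.1 + (PySem.Int.bitCount mask : Int)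
            let normalized := r.2.map (fun p => PySem.List.sorted (mask :: p) (fun x => x) false)
            if best.1 < coveredCount then (coveredCount, normalized.take 2)
            else if coveredCount = best.1 then (best.1, pvUnionA best.2 normalized)
            else best)
        (pvF row (PySem.Int.bxor a (PySem.Int.band a (-a)))) := by
  have hmpos : 0 < a.toNat := by omega
  show pvSolveA row (a.toNat + 1) a = _
  simp only [pvSolveA, if_neg h0]
  obtain ⟨hs1, hs2, _⟩ := pvSkipFact a ha h0
  rw [pvSolveA_fuel row hrow a.toNat _ hs1 (by omega)]
  refine PySem.List.foldl_congr_mem' _ _ _ _ ?_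
  intro mask hmem best
  by_cases hg : PySem.Int.band mask a = mask
  · obtain ⟨hxnn, hxne⟩ := hrow _ _ hmem
    obtain ⟨ht1, ht2, _⟩ := pvSuccFact a mask ha hxnn hxne hg
    simp only [if_neg (not_not_intro hg)]
    rw [pvSolveA_fuel row hrow a.toNat _ ht1 (by omega)]
    rfl
  · simp [hg]

-- facts about every successor of a nonnegative state
theorem pvSucc_mem_facts (row : PySem.Dict Int (List Int))
    (hrow : ∀ i x, x ∈ row.getD i [] → 0 ≤ x ∧ x ≠ 0) (s : Int) (hs : 0 ≤ s) :
    ∀ t ∈ pvSuccessors row s, 0 ≤ t ∧ t.toNat < s.toNat ∧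
      PySem.Int.bitCount t < PySem.Int.bitCount s := by
  intro t ht
  by_cases h0 : s = 0
  · simp [pvSuccessors, h0] at ht
  · simp only [pvSuccessors, if_neg h0, List.mem_cons] at ht
    rcases ht with rfl | ht
    · exact pvSkipFact s hs h0
    · obtain ⟨mask, hmask, rfl⟩ := List.mem_map.mp ht
      obtain ⟨hmem, hg⟩ := List.mem_filter.mp hmask
      obtain ⟨hxnn, hxne⟩ := hrow _ _ hmem
      exact pvSuccFact s mask hs hxnn hxne (of_decide_eq_true hg)

theorem pvSucc_head (row : PySem.Dict Int (List Int)) (s : Int) (h0 : s ≠ 0) :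
    PySem.Int.bxor s (PySem.Int.band s (-s)) ∈ pvSuccessors row s := by
  simp [pvSuccessors, if_neg h0]

theorem pvSucc_ofMask (row : PySem.Dict Int (List Int)) (s : Int) (h0 : s ≠ 0) (mask : Int)
    (hm : mask ∈ row.getD ((PySem.Int.bitLength (PySem.Int.band s (-s)) : Int) - 1) [])
    (hg : PySem.Int.band mask s = mask) :
    PySem.Int.bxor s mask ∈ pvSuccessors row s := by
  simp only [pvSuccessors, if_neg h0, List.mem_cons]
  right
  exact List.mem_map_of_mem (List.mem_filter.mpr ⟨hm, by simp [hg]⟩)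

-- the innermost add-if-absent fold of pvRound
theorem pvAddAllSpec : ∀ (ts : List Int) (acc : PySem.Set Int × List Int),
    (∀ u, u ∈ (ts.foldl (fun acc t => if PySem.Set.contains acc.1 t then acc
        else (PySem.Set.add acc.1 t, acc.2 ++ [t])) acc).1 ↔ u ∈ acc.1 ∨ u ∈ ts) ∧
    (∀ u ∈ (ts.foldl (fun acc t => if PySem.Set.contains acc.1 t then acc
        else (PySem.Set.add acc.1 t, acc.2 ++ [t])) acc).2, u ∈ acc.2 ∨ u ∈ ts) ∧
    (∀ u ∈ acc.2, u ∈ (ts.foldl (fun acc t => if PySem.Set.contains acc.1 t then acc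
        else (PySem.Set.add acc.1 t, acc.2 ++ [t])) acc).2) ∧
    (acc.1.Nodup → (ts.foldl (fun acc t => if PySem.Set.contains acc.1 t then acc
        else (PySem.Set.add acc.1 t, acc.2 ++ [t])) acc).1.Nodup) ∧
    (∀ u ∈ (ts.foldl (fun acc t => if PySem.Set.contains acc.1 t then acc
        else (PySem.Set.add acc.1 t, acc.2 ++ [t])) acc).1, u ∈ acc.1 ∨
        u ∈ (ts.foldl (fun acc t => if PySem.Set.contains acc.1 t then acc
        else (PySem.Set.add acc.1 t, acc.2 ++ [t])) acc).2) := by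
  intro ts
  induction ts with
  | nil =>
    intro acc
    simp only [List.foldl_nil]
    exact ⟨fun u => by simp, fun u hu => Or.inl hu, fun u hu => hu, fun h => h,
      fun u hu => Or.inl hu⟩
  | cons t ts ih =>
    intro acc
    simp only [List.foldl_cons]
    by_cases hc : PySem.Set.contains acc.1 t
    · have hmem : t ∈ acc.1 := List.mem_of_elem_eq_true hc
      rw [if_pos hc]
      obtain ⟨a1, a2, a3, a4, a5⟩ := ih acc
      refine ⟨?_, ?_, a3, a4, a5⟩
      · intro u
        rw [a1 u]
        constructor
        · rintro (h | h)
          · exact Or.inl h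
          · exact Or.inr (List.mem_cons_of_mem _ h)
        · rintro (h | h)
          · exact Or.inl h
          · rcases List.mem_cons.mp h with rfl | h
            · exact Or.inl hmem
            · exact Or.inr h
      · intro u hu
        rcases a2 u hu with h | h
        · exact Or.inl h
        · exact Or.inr (List.mem_cons_of_mem _ h)
    · have hmem : t ∉ acc.1 := fun hh => hc (List.elem_eq_true_of_mem hh)
      rw [if_neg hc, PySem.Set.add_of_not_mem hmem]
      obtain ⟨a1, a2, a3, a4, a5⟩ := ih (acc.1 ++ [t], acc.2 ++ [t])
      refine ⟨?_, ?_, ?_, ?_, ?_⟩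
      · intro u
        rw [a1 u]
        simp only [List.mem_append, List.mem_cons]
        tauto
      · intro u hu
        rcases a2 u hu with h | h
        · rcases List.mem_append.mp h with h | h
          · exact Or.inl h
          · simp only [List.mem_singleton] at h
            exact Or.inr (h ▸ List.mem_cons_self ..)
        · exact Or.inr (List.mem_cons_of_mem _ h)
      · intro u hu
        exact a3 u (List.mem_append.mpr (Or.inl hu))
      · intro hnd
        refine a4 ?_
        rw [List.nodup_append]
        refine ⟨hnd, List.nodup_singleton t, ?_⟩
        intro a ha b hb
        simp only [List.mem_singleton] at hb
        subst hb
        exact fun he => hmem (he ▸ ha)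
      · intro u hu
        rcases a5 u hu with h | h
        · rcases List.mem_append.mp h with h | h
          · exact Or.inl h
          · simp only [List.mem_singleton] at h
            subst h
            exact Or.inr (a3 u (by simp))
        · exact Or.inr h

-- the reachability invariant carried through the frontier-expansion rounds
def pvInv (row : PySem.Dict Int (List Int)) (cm : Int) (i : Nat)
    (st : PySem.Set Int × List Int) : Prop :=
  cm ∈ st.1 ∧ st.1.Nodup ∧ (∀ s ∈ st.1, 0 ≤ s) ∧ (∀ s ∈ st.2, s ∈ st.1) ∧
  (∀ s ∈ st.1, (∀ t ∈ pvSuccessors row s, t ∈ st.1) ∨ s ∈ st.2) ∧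
  (∀ s ∈ st.2, PySem.Int.bitCount s + i ≤ PySem.Int.bitCount cm)

theorem pvRoundGo (row : PySem.Dict Int (List Int))
    (hrow : ∀ i x, x ∈ row.getD i [] → 0 ≤ x ∧ x ≠ 0) (cm : Int) (i : Nat) :
    ∀ (fr : List Int) (acc : PySem.Set Int × List Int),
      cm ∈ acc.1 → acc.1.Nodup → (∀ s ∈ acc.1, 0 ≤ s) → (∀ s ∈ acc.2, s ∈ acc.1) →
      (∀ s ∈ acc.1, (∀ t ∈ pvSuccessors row s, t ∈ acc.1) ∨ s ∈ acc.2 ∨ s ∈ fr) →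
      (∀ s ∈ acc.2, PySem.Int.bitCount s + (i + 1) ≤ PySem.Int.bitCount cm) →
      (∀ s ∈ fr, s ∈ acc.1 ∧ PySem.Int.bitCount s + i ≤ PySem.Int.bitCount cm) →
      pvInv row cm (i + 1)
        (fr.foldl (fun acc s => (pvSuccessors row s).foldl (fun acc t =>
          if PySem.Set.contains acc.1 t then acc
          else (PySem.Set.add acc.1 t, acc.2 ++ [t])) acc) acc) := by
  intro fr
  induction fr with
  | nil =>
    intro acc h1 h2 h3 h4 h5 h6 _
    refine ⟨h1, h2, h3, h4, ?_, h6⟩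
    intro s hs
    rcases h5 s hs with h | h | h
    · exact Or.inl h
    · exact Or.inr h
    · simp at h
  | cons s fr ih =>
    intro acc h1 h2 h3 h4 h5 h6 h7
    simp only [List.foldl_cons]
    obtain ⟨hsacc, hspc⟩ := h7 s (by simp)
    have hsnn : 0 ≤ s := h3 s hsacc
    have hsucc := pvSucc_mem_facts row hrow s hsnn
    obtain ⟨a1, a2, a3, a4, a5⟩ := pvAddAllSpec (pvSuccessors row s) acc
    refine ih _ ?_ ?_ ?_ ?_ ?_ ?_ ?_
    · exact (a1 cm).mpr (Or.inl h1)
    · exact a4 h2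
    · intro u hu
      rcases (a1 u).mp hu with h | h
      · exact h3 u h
      · exact (hsucc u h).1
    · intro u hu
      rcases a2 u hu with h | h
      · exact (a1 u).mpr (Or.inl (h4 u h))
      · exact (a1 u).mpr (Or.inr h)
    · intro u hu
      by_cases hold : u ∈ acc.1
      · rcases h5 u hold with h | h | h
        · exact Or.inl (fun t ht => (a1 t).mpr (Or.inl (h t ht)))
        · exact Or.inr (Or.inl (a3 u h))
        · rcases List.mem_cons.mp h with rfl | h
          · exact Or.inl (fun t ht => (a1 t).mpr (Or.inr ht))
          · exact Or.inr (Or.inr h)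
      · rcases a5 u hu with h | h
        · exact absurd h hold
        · exact Or.inr (Or.inl h)
    · intro u hu
      rcases a2 u hu with h | h
      · exact h6 u h
      · have := (hsucc u h).2.2
        omega
    · intro u hu
      obtain ⟨hu1, hu2⟩ := h7 u (List.mem_cons_of_mem _ hu)
      exact ⟨(a1 u).mpr (Or.inl hu1), hu2⟩

theorem pvInv_round (row : PySem.Dict Int (List Int))
    (hrow : ∀ i x, x ∈ row.getD i [] → 0 ≤ x ∧ x ≠ 0) (cm : Int) (i : Nat)
    (st : PySem.Set Int × List Int) (h : pvInv row cm i st) :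
    pvInv row cm (i + 1) (pvRound row st) := by
  obtain ⟨h1, h2, h3, h4, h5, h6⟩ := h
  refine pvRoundGo row hrow cm i st.2 (st.1, []) h1 h2 h3 (by simp) ?_ (by simp) ?_
  · intro s hs
    rcases h5 s hs with h | h
    · exact Or.inl h
    · exact Or.inr (Or.inr h)
  · intro s hs
    exact ⟨h4 s hs, h6 s hs⟩

theorem pvBc0 (s : Int) (hs : 0 ≤ s) (h : PySem.Int.bitCount s = 0) : s = 0 := by
  obtain ⟨m, rfl⟩ := Int.eq_ofNat_of_zero_le hs
  rcases Nat.eq_zero_or_pos m with hm | hm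
  · simp [hm]
  · rw [pvPop_eq] at h
    have := pvPop_pos m hm
    omega

theorem pvReachSpec (row : PySem.Dict Int (List Int))
    (hrow : ∀ i x, x ∈ row.getD i [] → 0 ≤ x ∧ x ≠ 0) (cm : Int) (hcm : 0 ≤ cm) :
    cm ∈ pvReach row cm ∧ (pvReach row cm).Nodup ∧ (∀ s ∈ pvReach row cm, 0 ≤ s) ∧
    (∀ s ∈ pvReach row cm, ∀ t ∈ pvSuccessors row s, t ∈ pvReach row cm) := by
  have iter : ∀ (l : List Nat) (i : Nat) (st : PySem.Set Int × List Int), pvInv row cm i st →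
      pvInv row cm (i + l.length) (l.foldl (fun st _ => pvRound row st) st) := by
    intro l
    induction l with
    | nil => intro i st h; simpa using h
    | cons x l ih =>
      intro i st h
      have := ih (i + 1) (pvRound row st) (pvInv_round row hrow cm i st h)
      simpa [Nat.add_comm, Nat.add_assoc, Nat.add_left_comm] using this
  have hinit : pvInv row cm 0 (PySem.Set.ofList [cm], [cm]) := by
    have : PySem.Set.ofList [cm] = [cm] := PySem.Set.ofList_eq_self_of_nodup _ (by simp)
    rw [this]
    refine ⟨by simp, by simp, ?_, by simp, ?_, by simp⟩
    · intro s hs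
      simp only [List.mem_singleton] at hs
      exact hs ▸ hcm
    · intro s hs
      simp only [List.mem_singleton] at hs
      exact Or.inr (by simp [hs])
  have hfin := iter (List.range (PySem.Int.bitCount cm)) 0 _ hinit
  rw [List.length_range, Nat.zero_add] at hfin
  obtain ⟨h1, h2, h3, h4, h5, h6⟩ := hfin
  refine ⟨h1, h2, h3, ?_⟩
  intro s hs t ht
  rcases h5 s hs with h | h
  · exact h t ht
  · have hb := h6 s h
    have hs0 : s = 0 := pvBc0 s (h3 s (h4 s h)) (by omega)
    rw [hs0] at ht
    simp [pvSuccessors] at ht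

-- B's merge helper is A's union helper
theorem pvMergeB_eq : ∀ (a b : List (List Int)), pvMergeB a b = pvUnionA a b := by
  intro a b
  induction b generalizing a with
  | nil => rfl
  | cons p rest ih =>
    simp only [pvMergeB, pvUnionA]
    split_ifs with h1 h2
    · exact ih a
    · rfl
    · exact ih (a ++ [p])

-- bottom-up table correctness: processing the reachable states in increasing order
-- stores exactly the canonical _solve value at every state
theorem pvDpGo (row : PySem.Dict Int (List Int))
    (hrow : ∀ i x, x ∈ row.getD i [] → 0 ≤ x ∧ x ≠ 0) (R : List Int)
    (hRnn : ∀ s ∈ R, 0 ≤ s)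
    (hcl : ∀ s ∈ R, ∀ t ∈ pvSuccessors row s, t ∈ R) :
    ∀ (rest p : List Int) (dp : PySem.Dict Int (Int × List (List Int))),
      (p ++ rest).Pairwise (· < ·) →
      (∀ t, t ∈ R ↔ t ∈ p ++ rest) →
      (∀ t ∈ p, dp.get? t = some (pvF row t)) →
      ∀ t ∈ R, (rest.foldl (pvStep row) dp).get? t = some (pvF row t) := by
  intro rest
  induction rest with
  | nil =>
    intro p dp _ hiff hdone t htR
    have := (hiff t).mp htR
    simp only [List.append_nil] at this
    simpa using hdone t this
  | cons s rest ih =>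
    intro p dp hpw hiff hdone t htR
    have hsR : s ∈ R := (hiff s).mpr (by simp)
    have hsnn : 0 ≤ s := hRnn s hsR
    have hstep : pvStep row dp s = dp.insert s (pvF row s) := by
      by_cases h0 : s = 0
      · subst h0
        have hz : pvStep row dp 0 = dp.insert 0 (0, [[]]) := by simp [pvStep]
        rw [hz, pvF_zero]
      · have hlook : ∀ t' ∈ pvSuccessors row s, dp.getD t' (0, [[]]) = pvF row t' := by
          intro t' ht'
          obtain ⟨htnn, htlt, _⟩ := pvSucc_mem_facts row hrow s hsnn t' ht'
          have ht'R : t' ∈ R := hcl s hsR t' ht'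
          have htlt' : t' < s := by
            have e1 := Int.toNat_of_nonneg htnn
            have e2 := Int.toNat_of_nonneg hsnn
            omega
          have ht'p : t' ∈ p := by
            have hm := (hiff t').mp ht'R
            rcases List.mem_append.mp hm with h | h
            · exact h
            · rcases List.mem_cons.mp h with rfl | h
              · omega
              · have hrel := (List.pairwise_cons.mp (List.pairwise_append.mp hpw).2.1).1 t' h
                omega
          exact PySem.Dict.getD_of_get?_eq_some _ _ (hdone t' ht'p)
        simp only [pvStep, if_neg h0]
        congr 1
        rw [pvF_unfold row hrow s hsnn h0,
            hlook _ (pvSucc_head row s h0)]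
        refine PySem.List.foldl_congr_mem' _ _ _ _ ?_
        intro mask hmem best
        by_cases hg : PySem.Int.band mask s = mask
        · simp only [if_neg (not_not_intro hg)]
          rw [hlook _ (pvSucc_ofMask row s h0 mask hmem hg), pvMergeB_eq]
        · simp [hg]
    rw [List.foldl_cons, hstep]
    refine ih (p ++ [s]) (dp.insert s (pvF row s)) ?_ ?_ ?_ t htR
    · rwa [List.append_cons] at hpw
    · intro u
      rw [hiff u, List.append_cons]
    · intro u hu
      rcases List.mem_append.mp hu with h | h
      · have hne : u ≠ s := by
          have := (List.pairwise_append.mp hpw).2.2 u h s (by simp)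
          omega
        rw [PySem.Dict.get?_insert_of_ne _ _ hne]
        exact hdone u h
      · simp only [List.mem_singleton] at h
        subst h
        exact PySem.Dict.get?_insert_self _ _ _

-- ===== VERDICT (by name: the statement is the Claim_ definition above) =====
theorem unique_grouped_component_mask_py_spec : Claim_equal_unique_grouped_component_mask_py := by
  intro cm masks _ hpre
  obtain ⟨hcm, hmasks⟩ := hpre
  unfold Spec_unique_grouped_component_mask_py
  have hrow := pvRowMasksInv masks hmasks
  obtain ⟨hmem, hnd, hnn, hcl⟩ := pvReachSpec (pvRowMasks masks) hrow cm hcm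
  have hperm := PySem.List.sorted_perm (pvReach (pvRowMasks masks) cm) (fun x => x) false
  have hple := PySem.List.sorted_pairwise (pvReach (pvRowMasks masks) cm) (fun x => x)
  have hnd2 : (PySem.List.sorted (pvReach (pvRowMasks masks) cm) (fun x => x) false).Nodup :=
    hperm.nodup_iff.mpr hnd
  have hpw : (PySem.List.sorted (pvReach (pvRowMasks masks) cm) (fun x => x) false).Pairwise
      (· < ·) := (hple.and hnd2).imp (fun h => lt_of_le_of_ne h.1 h.2)
  have hiff : ∀ t, t ∈ pvReach (pvRowMasks masks) cm ↔
      t ∈ [] ++ PySem.List.sorted (pvReach (pvRowMasks masks) cm) (fun x => x) false := by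
    intro t
    simp only [List.nil_append]
    exact (hperm.mem_iff).symm
  have hget := pvDpGo (pvRowMasks masks) hrow (pvReach (pvRowMasks masks) cm) hnn hcl
    (PySem.List.sorted (pvReach (pvRowMasks masks) cm) (fun x => x) false) [] PySem.Dict.empty
    (by simpa using hpw) hiff (by intro t ht; simp at ht) cm hmem
  have hgetD := PySem.Dict.getD_of_get?_eq_some _ ((0 : Int), ([[]] : List (List Int))) hget
  unfold unique_grouped_component_mask_py unique_grouped_component_mask_py_alt
  simp only [hgetD]
  rfl
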